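-- pv_equiv track=rewrite | github.com/letartes/Code | Current release verions/protein_aligner.py | _cdr_id
-- ===== SOURCE A (Python) =====
-- def _cdr_id(aln1, aln2, cdr_start, cdr_end):
--     matches = total = 0
--     sp = 0
--     for a, b in zip(aln1, aln2):
--         if a != '-':
--             if cdr_start <= sp <= cdr_end:
--                 total += 1
--                 if a == b:
--                     matches += 1
--             sp += 1
--     return matches, total
-- ===== SOURCE B (Python) =====
-- def _cdr_id(aln1, aln2, cdr_start, cdr_end):
--     residues = [(a, b) for a, b in zip(aln1, aln2) if a != '-']
--     lo = max(cdr_start, 0)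
--     hi = max(cdr_end + 1, 0)
--     window = residues[lo:hi]
--     matches = sum(1 for a, b in window if a == b)
--     return matches, len(window)
-- ===== Notes on version B (the rewrite author's own statement) =====
-- stated objective: simpler
-- what changed: Replaces the running-position single pass (stateful sp counter with nested branches) by an index-then-window decomposition: build the non-gap residue pairs, slice the CDR window with clamped bounds, and count matches in the window.
import Mathlib
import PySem

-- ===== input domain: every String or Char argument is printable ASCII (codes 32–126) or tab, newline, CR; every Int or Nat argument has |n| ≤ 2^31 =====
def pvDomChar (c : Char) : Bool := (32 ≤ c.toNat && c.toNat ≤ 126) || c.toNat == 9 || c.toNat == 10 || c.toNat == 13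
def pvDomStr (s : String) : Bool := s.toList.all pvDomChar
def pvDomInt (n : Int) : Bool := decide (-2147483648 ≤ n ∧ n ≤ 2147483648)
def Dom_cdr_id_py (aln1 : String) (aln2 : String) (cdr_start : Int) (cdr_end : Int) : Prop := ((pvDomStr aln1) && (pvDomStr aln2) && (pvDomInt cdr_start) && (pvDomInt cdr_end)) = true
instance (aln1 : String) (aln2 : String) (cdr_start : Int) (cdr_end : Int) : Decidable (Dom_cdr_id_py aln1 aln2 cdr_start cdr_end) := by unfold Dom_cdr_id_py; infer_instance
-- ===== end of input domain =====

-- B replaces A's running-position single pass by an index-then-window decomposition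
-- (filter non-gap pairs, slice the CDR window with clamped bounds, count matches): simpler, same cost.


-- ===== PORT A =====
-- one step of A's loop body; state = (matches, total, sp)
def cdrStepA (cdr_start cdr_end : Int) (st : Int × Int × Int) (ab : Char × Char) : Int × Int × Int :=
  if ab.1 ≠ '-' then
    if cdr_start ≤ st.2.2 ∧ st.2.2 ≤ cdr_end then
      (st.1 + (if ab.1 = ab.2 then 1 else 0), st.2.1 + 1, st.2.2 + 1)
    else (st.1, st.2.1, st.2.2 + 1)
  else st

def cdr_id_py (aln1 : String) (aln2 : String) (cdr_start : Int) (cdr_end : Int) : Int × Int :=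
  let st := (aln1.toList.zip aln2.toList).foldl (cdrStepA cdr_start cdr_end) (0, 0, 0)
  (st.1, st.2.1)

-- ===== PORT B =====
def cdr_id_py_alt (aln1 : String) (aln2 : String) (cdr_start : Int) (cdr_end : Int) : Int × Int :=
  let residues := (aln1.toList.zip aln2.toList).filter (fun ab => ab.1 != '-')
  let lo := max cdr_start 0
  let hi := max (cdr_end + 1) 0
  let window := PySem.List.slice residues (some lo) (some hi)
  let matchCount := (window.filter (fun ab => ab.1 == ab.2)).length
  ((matchCount : Int), (window.length : Int))

-- ===== PRECONDITION & SPEC =====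
def Spec_cdr_id_py (aln1 : String) (aln2 : String) (cdr_start : Int) (cdr_end : Int) (out : Int × Int) : Prop := out = cdr_id_py_alt aln1 aln2 cdr_start cdr_end
instance (aln1 : String) (aln2 : String) (cdr_start : Int) (cdr_end : Int) (out : Int × Int) : Decidable (Spec_cdr_id_py aln1 aln2 cdr_start cdr_end out) := by unfold Spec_cdr_id_py; infer_instance

-- ===== CLAIM (what is proved, stated in full; the proofs are below) =====
def Claim_equal_cdr_id_py : Prop := ∀ (aln1 : String) (aln2 : String) (cdr_start : Int) (cdr_end : Int), Dom_cdr_id_py aln1 aln2 cdr_start cdr_end → Spec_cdr_id_py aln1 aln2 cdr_start cdr_end (cdr_id_py aln1 aln2 cdr_start cdr_end)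

-- ===== LEMMAS AND PROOFS =====

-- the window of rs seen from running position sp (clamped drop/take form of B's slice)
def cdrWin (cdr_start cdr_end : Int) (rs : List (Char × Char)) (sp : Int) : List (Char × Char) :=
  (rs.drop (cdr_start - sp).toNat).take ((cdr_end + 1 - sp).toNat - (cdr_start - sp).toNat)

-- A's fold skips gap pairs: folding over the list equals folding over its non-gap filter
theorem cdr_fold_filter (cdr_start cdr_end : Int) (l : List (Char × Char)) (st : Int × Int × Int) :
    l.foldl (cdrStepA cdr_start cdr_end) st
      = (l.filter (fun ab => ab.1 != '-')).foldl (cdrStepA cdr_start cdr_end) st := by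
  induction l generalizing st with
  | nil => rfl
  | cons r tl ih =>
    by_cases h : r.1 = '-'
    · simp [cdrStepA, h, ih]
    · simp [h, ih]

-- the loop invariant: over gap-free pairs, A's fold adds exactly the window's match count and length
theorem cdr_fold_win (cdr_start cdr_end : Int) (rs : List (Char × Char))
    (hng : ∀ x ∈ rs, x.1 ≠ '-') (m t sp : Int) :
    rs.foldl (cdrStepA cdr_start cdr_end) (m, t, sp)
      = (m + (((cdrWin cdr_start cdr_end rs sp).filter (fun ab => ab.1 == ab.2)).length : Int),
         t + ((cdrWin cdr_start cdr_end rs sp).length : Int),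
         sp + (rs.length : Int)) := by
  induction rs generalizing m t sp with
  | nil => simp [cdrWin]
  | cons r tl ih =>
    have hr : r.1 ≠ '-' := hng r (by simp)
    have hng' : ∀ x ∈ tl, x.1 ≠ '-' := fun x hx => hng x (by simp [hx])
    by_cases h : cdr_start ≤ sp ∧ sp ≤ cdr_end
    · -- inside the CDR window: head contributes
      have hwin : cdrWin cdr_start cdr_end (r :: tl) sp = r :: cdrWin cdr_start cdr_end tl (sp + 1) := by
        unfold cdrWin
        rw [show (cdr_start - sp).toNat = 0 by omega,
            show (cdr_start - (sp + 1)).toNat = 0 by omega,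
            show (cdr_end + 1 - sp).toNat = (cdr_end + 1 - (sp + 1)).toNat + 1 by omega]
        simp
      rw [List.foldl_cons, show cdrStepA cdr_start cdr_end (m, t, sp) r
            = (m + (if r.1 = r.2 then 1 else 0), t + 1, sp + 1) by simp [cdrStepA, hr, h],
          ih hng', hwin]
      by_cases hm : r.1 = r.2 <;> simp [hm] <;> omega
    · -- outside the window: head contributes nothing, windows coincide
      have hwin : cdrWin cdr_start cdr_end (r :: tl) sp = cdrWin cdr_start cdr_end tl (sp + 1) := by
        unfold cdrWin
        rcases (by omega : sp < cdr_start ∨ cdr_end < sp) with hlt | hgt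
        · rw [show (cdr_end + 1 - sp).toNat - (cdr_start - sp).toNat
                 = (cdr_end + 1 - (sp + 1)).toNat - (cdr_start - (sp + 1)).toNat by omega,
              show (cdr_start - sp).toNat = (cdr_start - (sp + 1)).toNat + 1 by omega,
              List.drop_succ_cons]
        · rw [show (cdr_end + 1 - sp).toNat - (cdr_start - sp).toNat = 0 by omega,
              show (cdr_end + 1 - (sp + 1)).toNat - (cdr_start - (sp + 1)).toNat = 0 by omega]
          simp
      rw [List.foldl_cons, show cdrStepA cdr_start cdr_end (m, t, sp) r = (m, t, sp + 1) by
            simp [cdrStepA, hr, h],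
          ih hng', hwin]
      refine Prod.ext rfl (Prod.ext rfl ?_)
      simp only [List.length_cons]; push_cast; omega

-- B's clamped slice is the window at sp = 0
theorem cdr_alt_win (cdr_start cdr_end : Int) (rs : List (Char × Char)) :
    PySem.List.slice rs (some (max cdr_start 0)) (some (max (cdr_end + 1) 0))
      = cdrWin cdr_start cdr_end rs 0 := by
  rw [PySem.List.slice_toNat rs (le_max_right _ _) (le_max_right _ _)]
  unfold cdrWin
  rw [show (max cdr_start 0).toNat = (cdr_start - 0).toNat by omega,
      show (max (cdr_end + 1) 0).toNat = (cdr_end + 1 - 0).toNat by omega]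

-- ===== VERDICT (by name: the statement is the Claim_ definition above) =====
theorem cdr_id_py_spec : Claim_equal_cdr_id_py := by
  intro aln1 aln2 cdr_start cdr_end _
  unfold Spec_cdr_id_py cdr_id_py cdr_id_py_alt
  rw [cdr_fold_filter, cdr_fold_win cdr_start cdr_end _
        (fun x hx => by simpa using (List.of_mem_filter hx)) 0 0 0]
  simp [cdr_alt_win]
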